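-- pv_equiv track=rewrite | github.com/maumay/Learning-Haskell | daily-coding-problem/arrays/1_2.py | answer
-- ===== SOURCE A (Python) =====
-- def answer(xs):
--     # assume non empty
--     forward_max, backward_min = [xs[0]], [xs[-1]]
--     for i in range(1, len(xs)):
--         forward_max.append(max(xs[i], forward_max[-1]))
--         backward_min.append(min(xs[-1 - i], backward_min[-1]))
--     backward_min = list(reversed(backward_min))
--     # Now find bounds
--     lo, lo_max = 0, len(xs) - 1
--     hi, hi_min = lo_max, lo
--     while lo < lo_max and forward_max[lo] <= backward_min[lo + 1]:
--         lo += 1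
--     while hi > hi_min and forward_max[hi - 1] <= backward_min[hi]:
--         hi -= 1
--     return lo, hi
-- ===== SOURCE B (Python) =====
-- def answer(xs):
--     n = len(xs)
--     running_max = xs[0]
--     hi = 0
--     for i in range(1, n):
--         if xs[i] < running_max:
--             hi = i
--         else:
--             running_max = xs[i]
--     running_min = xs[-1]
--     lo = n - 1
--     for i in range(n - 2, -1, -1):
--         if xs[i] > running_min:
--             lo = i
--         else:
--             running_min = xs[i]
--     return lo, hi
-- ===== Notes on version B (the rewrite author's own statement) =====
-- stated objective: simpler
-- what changed: Replaces A's two materialised prefix-max/suffix-min arrays (built, reversed, then re-scanned by two while loops) with two single scans keeping one scalar running extreme each, so no auxiliary lists are allocated (O(1) extra space).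
import Mathlib
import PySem

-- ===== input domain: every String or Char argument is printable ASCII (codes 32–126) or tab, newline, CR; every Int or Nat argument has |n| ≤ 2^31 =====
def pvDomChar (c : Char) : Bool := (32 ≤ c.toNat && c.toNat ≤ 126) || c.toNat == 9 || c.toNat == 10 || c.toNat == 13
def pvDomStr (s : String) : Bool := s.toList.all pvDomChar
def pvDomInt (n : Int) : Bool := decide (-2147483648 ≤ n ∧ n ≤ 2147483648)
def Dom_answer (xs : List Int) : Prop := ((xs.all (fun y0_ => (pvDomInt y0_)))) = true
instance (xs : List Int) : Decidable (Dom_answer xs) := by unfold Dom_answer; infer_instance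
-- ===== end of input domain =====

-- B replaces A's two auxiliary prefix-max/suffix-min arrays and the two while loops
-- by two scalar scans with running extremes (objective: simpler, O(1) extra space).
-- Both A and B raise IndexError on the empty list; Pre_ excludes it.

-- ===== PORT A =====
-- first while loop of A:  while lo < lo_max and forward_max[lo] <= backward_min[lo+1]: lo += 1
def loLoopA (F B : List Int) (loMax lo : Nat) : Nat :=
  if h : lo < loMax ∧ F.getD lo 0 ≤ B.getD (lo+1) 0 then loLoopA F B loMax (lo+1) else lo
termination_by loMax - lo
decreasing_by omega

-- second while loop of A:  while hi > 0 and forward_max[hi-1] <= backward_min[hi]: hi -= 1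
def hiLoopA (F B : List Int) (hi : Nat) : Nat :=
  if h : 0 < hi ∧ F.getD (hi-1) 0 ≤ B.getD hi 0 then hiLoopA F B (hi-1) else hi
termination_by hi
decreasing_by omega

-- xs[i] for 0 ≤ i < len(xs) is xs.getD i 0 (always in range here); xs[-1-i] is xs.getD (n-1-i) 0
def answer (xs : List Int) : Int × Int :=
  let n := xs.length
  let st := (List.range' 1 (n-1)).foldl
    (fun (st : List Int × List Int) i =>
      (st.1 ++ [max (xs.getD i 0) (st.1.getLastD 0)],
       st.2 ++ [min (xs.getD (n-1-i) 0) (st.2.getLastD 0)]))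
    ([xs.getD 0 0], [xs.getD (n-1) 0])
  let F := st.1
  let Bm := st.2.reverse
  ((loLoopA F Bm (n-1) 0 : Int), (hiLoopA F Bm (n-1) : Int))

-- ===== PORT B =====
-- forward scan: running max, hi = last index falling below it (default 0)
-- backward scan over range(n-2,-1,-1): running min, lo = first index above it (default n-1)
def answer_alt (xs : List Int) : Int × Int :=
  let n := xs.length
  let fwd := (List.range' 1 (n-1)).foldl
    (fun (st : Nat × Int) i => if xs.getD i 0 < st.2 then (i, st.2) else (st.1, xs.getD i 0))
    (0, xs.getD 0 0)
  let bwd := ((List.range (n-1)).reverse).foldl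
    (fun (st : Nat × Int) i => if st.2 < xs.getD i 0 then (i, st.2) else (st.1, xs.getD i 0))
    (n-1, xs.getD (n-1) 0)
  ((bwd.1 : Int), (fwd.1 : Int))

-- ===== PRECONDITION & SPEC =====
-- Pre_ excludes only the empty list, on which both A and B raise IndexError (xs[0]).
def Pre_answer (xs : List Int) : Prop := xs ≠ []
instance (xs : List Int) : Decidable (Pre_answer xs) := by unfold Pre_answer; infer_instance
def pvWitness_answer : List Int := ([3, 1, 2])

def Spec_answer (xs : List Int) (out : Int × Int) : Prop := out = answer_alt xs
instance (xs : List Int) (out : Int × Int) : Decidable (Spec_answer xs out) := by unfold Spec_answer; infer_instance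

-- ===== CLAIM (what is proved, stated in full; the proofs are below) =====
def Claim_equal_answer : Prop := ∀ (xs : List Int), Dom_answer xs → Pre_answer xs → Spec_answer xs (answer xs)

-- ===== LEMMAS AND PROOFS =====

-- pmax xs j = max xs[0..j];  smin xs k = min of the last k+1 elements of xs
def pmax (xs : List Int) : Nat → Int
  | 0 => xs.getD 0 0
  | j+1 => max (xs.getD (j+1) 0) (pmax xs j)

def smin (xs : List Int) : Nat → Int
  | 0 => xs.getD (xs.length - 1) 0
  | k+1 => min (xs.getD (xs.length - 1 - (k+1)) 0) (smin xs k)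

theorem pmax_mono (xs : List Int) {i j : Nat} (h : i ≤ j) : pmax xs i ≤ pmax xs j := by
  induction j with
  | zero => interval_cases i; rfl
  | succ j ih =>
    rcases Nat.lt_succ_iff_lt_or_eq.mp (Nat.lt_succ_of_le h) with h' | h'
    · exact le_trans (ih (Nat.lt_succ_iff.mp h')) (le_max_right _ _)
    · subst h'; rfl

theorem le_pmax (xs : List Int) {i j : Nat} (h : i ≤ j) : xs.getD i 0 ≤ pmax xs j := by
  induction j with
  | zero => interval_cases i; exact le_of_eq rfl
  | succ j ih =>
    rcases Nat.lt_succ_iff_lt_or_eq.mp (Nat.lt_succ_of_le h) with h' | h'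
    · exact le_trans (ih (Nat.lt_succ_iff.mp h')) (le_max_right _ _)
    · subst h'; exact le_max_left _ _

theorem pmax_attained (xs : List Int) (j : Nat) : ∃ i, i ≤ j ∧ pmax xs j ≤ xs.getD i 0 := by
  induction j with
  | zero => exact ⟨0, le_refl _, le_of_eq rfl⟩
  | succ j ih =>
    rcases ih with ⟨i, hi, hle⟩
    rcases le_or_gt (xs.getD (j+1) 0) (pmax xs j) with h | h
    · refine ⟨i, Nat.le_succ_of_le hi, ?_⟩
      show max (xs.getD (j+1) 0) (pmax xs j) ≤ _
      rw [max_eq_right h]; exact hle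
    · refine ⟨j+1, le_refl _, ?_⟩
      show max (xs.getD (j+1) 0) (pmax xs j) ≤ _
      rw [max_eq_left (le_of_lt h)]

theorem smin_mono (xs : List Int) {k k' : Nat} (h : k ≤ k') : smin xs k' ≤ smin xs k := by
  induction k' with
  | zero => interval_cases k; exact le_of_eq rfl
  | succ k' ih =>
    rcases Nat.lt_succ_iff_lt_or_eq.mp (Nat.lt_succ_of_le h) with h' | h'
    · exact le_trans (min_le_right _ _) (ih (Nat.lt_succ_iff.mp h'))
    · subst h'; exact le_of_eq rfl

theorem smin_le (xs : List Int) {k j : Nat} (h1 : xs.length - 1 - k ≤ j) (h2 : j ≤ xs.length - 1) :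
    smin xs k ≤ xs.getD j 0 := by
  induction k generalizing j with
  | zero =>
    have hj : j = xs.length - 1 := by omega
    subst hj; exact le_of_eq rfl
  | succ k ih =>
    by_cases hj : xs.length - 1 - k ≤ j
    · exact le_trans (min_le_right _ _) (ih hj h2)
    · have : j = xs.length - 1 - (k+1) := by omega
      subst this; exact min_le_left _ _

theorem smin_attained (xs : List Int) (k : Nat) :
    ∃ i, xs.length - 1 - k ≤ i ∧ i ≤ xs.length - 1 ∧ xs.getD i 0 ≤ smin xs k := by
  induction k with
  | zero => exact ⟨xs.length - 1, by omega, le_refl _, le_of_eq rfl⟩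
  | succ k ih =>
    rcases ih with ⟨i, hi1, hi2, hle⟩
    rcases le_or_gt (xs.getD (xs.length - 1 - (k+1)) 0) (smin xs k) with h | h
    · refine ⟨xs.length - 1 - (k+1), le_refl _, by omega, ?_⟩
      show _ ≤ min (xs.getD (xs.length - 1 - (k+1)) 0) (smin xs k)
      exact (min_eq_left h).ge
    · refine ⟨i, by omega, hi2, ?_⟩
      show _ ≤ min (xs.getD (xs.length - 1 - (k+1)) 0) (smin xs k)
      rw [min_eq_right (le_of_lt h)]; exact hle

-- the predicates the two programs detect
def Qlo (xs : List Int) (i : Nat) : Prop := smin xs (xs.length - 2 - i) < xs.getD i 0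
def Qhi (xs : List Int) (i : Nat) : Prop := xs.getD i 0 < pmax xs (i - 1)
def Plo (xs : List Int) (j : Nat) : Prop := smin xs (xs.length - 2 - j) < pmax xs j
def Phi (xs : List Int) (j : Nat) : Prop := smin xs (xs.length - 1 - j) < pmax xs (j - 1)

-- the three fold bodies, named for the proofs (definitionally the lambdas in the ports)
def gA (xs : List Int) : (List Int × List Int) → Nat → (List Int × List Int) :=
  fun st i =>
    (st.1 ++ [max (xs.getD i 0) (st.1.getLastD 0)],
     st.2 ++ [min (xs.getD (xs.length-1-i) 0) (st.2.getLastD 0)])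
def gfwd (xs : List Int) : (Nat × Int) → Nat → (Nat × Int) :=
  fun st i => if xs.getD i 0 < st.2 then (i, st.2) else (st.1, xs.getD i 0)
def gbwd (xs : List Int) : (Nat × Int) → Nat → (Nat × Int) :=
  fun st i => if st.2 < xs.getD i 0 then (i, st.2) else (st.1, xs.getD i 0)

-- A's fold builds exactly the prefix-max and (reversed) suffix-min tables
theorem A_fold (xs : List Int) (k : Nat) :
    (List.range' 1 k).foldl (gA xs) ([xs.getD 0 0], [xs.getD (xs.length-1) 0])
    = ((List.range (k+1)).map (pmax xs), (List.range (k+1)).map (smin xs)) := by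
  induction k with
  | zero => rfl
  | succ k ih =>
    rw [show List.range' 1 (k+1) = List.range' 1 k ++ [1+k] from by
      simpa using (List.range'_concat (s := 1) (n := k) (step := 1)),
      List.foldl_append, ih]
    have hL : ∀ f : Nat → Int, ((List.range (k+1)).map f).getLastD 0 = f k := by
      intro f
      rw [show List.range (k+1) = List.range k ++ [k] from List.range_succ, List.map_append]
      exact List.getLastD_concat ..
    simp only [List.foldl_cons, List.foldl_nil, gA, hL]
    rw [show List.range (k+1+1) = List.range (k+1) ++ [k+1] from List.range_succ,
      List.map_append, List.map_append]
    simp [pmax, smin, Nat.add_comm 1 k]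

theorem F_getD (xs : List Int) {n j : Nat} (hn : n = xs.length) (hj : j < n) :
    ((List.range n).map (pmax xs)).getD j 0 = pmax xs j := by
  subst hn
  rw [List.getD_eq_getElem _ 0 (by simpa using hj)]
  simp

theorem Bm_getD (xs : List Int) {n j : Nat} (hn : n = xs.length) (hj : j < n) :
    ((List.range n).map (smin xs)).reverse.getD j 0 = smin xs (n - 1 - j) := by
  subst hn
  rw [List.getD_eq_getElem _ 0 (by simpa using hj)]
  rw [List.getElem_reverse]
  simp

theorem loLoopA_spec (F B : List Int) (loMax : Nat) (lo : Nat) :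
    lo ≤ loLoopA F B loMax lo ∧ (lo ≤ loMax → loLoopA F B loMax lo ≤ loMax) ∧
    (∀ j, lo ≤ j → j < loLoopA F B loMax lo → F.getD j 0 ≤ B.getD (j+1) 0) ∧
    (loLoopA F B loMax lo < loMax →
      ¬ F.getD (loLoopA F B loMax lo) 0 ≤ B.getD (loLoopA F B loMax lo + 1) 0) := by
  fun_induction loLoopA F B loMax lo with
  | case1 lo hcond ih =>
    obtain ⟨ih1, ih2, ih3, ih4⟩ := ih
    refine ⟨by omega, fun _ => ih2 (by omega), ?_, ih4⟩
    intro j hj1 hj2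
    rcases Nat.lt_or_ge lo j with h' | h'
    · exact ih3 j (by omega) hj2
    · have hj : j = lo := by omega
      subst hj; exact hcond.2
  | case2 lo hcond =>
    refine ⟨le_refl _, fun h => h, fun j h1 h2 => absurd h1 (by omega), fun h hc => ?_⟩
    exact hcond ⟨h, hc⟩

theorem hiLoopA_spec (F B : List Int) (hi : Nat) :
    hiLoopA F B hi ≤ hi ∧
    (∀ j, hiLoopA F B hi < j → j ≤ hi → F.getD (j-1) 0 ≤ B.getD j 0) ∧
    (0 < hiLoopA F B hi → ¬ F.getD (hiLoopA F B hi - 1) 0 ≤ B.getD (hiLoopA F B hi) 0) := by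
  fun_induction hiLoopA F B hi with
  | case1 hi hcond ih =>
    obtain ⟨ih1, ih2, ih3⟩ := ih
    refine ⟨by omega, ?_, ih3⟩
    intro j hj1 hj2
    rcases Nat.lt_or_ge j hi with h' | h'
    · exact ih2 j hj1 (by omega)
    · have hj : j = hi := by omega
      subst hj; exact hcond.2
  | case2 hi hcond =>
    exact ⟨le_refl _, fun j h1 h2 => absurd h1 (by omega), fun h hc => hcond ⟨h, hc⟩⟩

-- B's forward fold: running max is the prefix max; hi is the greatest Qhi index so far
theorem fwd_fold_spec (xs : List Int) (k : Nat) :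
    ((List.range' 1 k).foldl (gfwd xs) (0, xs.getD 0 0)).2 = pmax xs k ∧
    ((List.range' 1 k).foldl (gfwd xs) (0, xs.getD 0 0)).1 ≤ k ∧
    (1 ≤ ((List.range' 1 k).foldl (gfwd xs) (0, xs.getD 0 0)).1 →
      Qhi xs (((List.range' 1 k).foldl (gfwd xs) (0, xs.getD 0 0)).1)) ∧
    (∀ i, ((List.range' 1 k).foldl (gfwd xs) (0, xs.getD 0 0)).1 < i → i ≤ k → ¬ Qhi xs i) := by
  induction k with
  | zero =>
    refine ⟨rfl, le_refl _, fun h => absurd h (by simp), fun i h1 h2 => absurd (lt_of_lt_of_le h1 h2) (by simp)⟩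
  | succ k ih =>
    rw [show List.range' 1 (k+1) = List.range' 1 k ++ [1+k] from by
      simpa using (List.range'_concat (s := 1) (n := k) (step := 1)), List.foldl_append]
    simp only [List.foldl_cons, List.foldl_nil]
    obtain ⟨ih1, ih2, ih3, ih4⟩ := ih
    set r := (List.range' 1 k).foldl (gfwd xs) (0, xs.getD 0 0) with hr
    rw [show (1+k) = k+1 from by omega]
    by_cases h : xs.getD (k+1) 0 < r.2
    · rw [show gfwd xs r (k+1) = (k+1, r.2) from by simp only [gfwd]; rw [if_pos h]]
      refine ⟨?_, by omega, fun _ => ?_, fun i h1 h2 => absurd (lt_of_lt_of_le h1 h2) (by omega)⟩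
      · show r.2 = pmax xs (k+1)
        rw [ih1] at h ⊢
        exact (max_eq_right (le_of_lt h)).symm
      · show xs.getD (k+1) 0 < pmax xs (k+1-1)
        simpa using ih1 ▸ h
    · rw [show gfwd xs r (k+1) = (r.1, xs.getD (k+1) 0) from by simp only [gfwd]; rw [if_neg h]]
      rw [ih1] at h
      refine ⟨?_, by omega, ih3, ?_⟩
      · show xs.getD (k+1) 0 = pmax xs (k+1)
        exact (max_eq_left (not_lt.mp h)).symm
      · intro i h1 h2
        rcases Nat.lt_or_ge i (k+1) with h' | h'
        · exact ih4 i h1 (by omega)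
        · have hi : i = k+1 := by omega
          subst hi
          show ¬ xs.getD (k+1) 0 < pmax xs (k+1-1)
          simpa using h

-- B's backward fold: running min is the suffix min; lo is the least Qlo index so far
theorem bwd_fold_spec (xs : List Int) (k : Nat) (s : Nat) (m : Int)
    (hk : k ≤ xs.length - 1) (hm : m = smin xs (xs.length - 1 - k))
    (hs : s ≤ xs.length - 1) (hsq : s < xs.length - 1 → (k ≤ s ∧ Qlo xs s))
    (hmin : ∀ i, k ≤ i → i < s → ¬ Qlo xs i) :
    (((List.range k).reverse).foldl (gbwd xs) (s, m)).1 ≤ xs.length - 1 ∧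
    ((((List.range k).reverse).foldl (gbwd xs) (s, m)).1 < xs.length - 1 →
      Qlo xs ((((List.range k).reverse).foldl (gbwd xs) (s, m)).1)) ∧
    (∀ i, i < (((List.range k).reverse).foldl (gbwd xs) (s, m)).1 → ¬ Qlo xs i) := by
  induction k generalizing s m with
  | zero =>
    refine ⟨hs, fun h => (hsq h).2, fun i hi => hmin i (by omega) hi⟩
  | succ k ih =>
    rw [show (List.range (k+1)).reverse = k :: (List.range k).reverse from by
      simp [List.range_succ], List.foldl_cons]
    have hsucc : xs.length - 1 - k = (xs.length - 1 - (k+1)) + 1 := by omega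
    have hsmin : smin xs (xs.length - 1 - k)
        = min (xs.getD k 0) (smin xs (xs.length - 1 - (k+1))) := by
      rw [hsucc, smin, show xs.length - 1 - ((xs.length - 1 - (k+1)) + 1) = k from by omega]
    have hmk : smin xs (xs.length - 1 - (k+1)) = smin xs (xs.length - 2 - k) := by
      congr 1; omega
    by_cases h : m < xs.getD k 0
    · rw [show gbwd xs (s, m) k = (k, m) from by simp only [gbwd]; rw [if_pos h]]
      have hq : Qlo xs k := by
        show smin xs (xs.length - 2 - k) < xs.getD k 0
        rw [← hmk, ← hm]; exact h
      have hm' : m = smin xs (xs.length - 1 - k) := by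
        rw [hsmin, min_eq_right (by rw [← hm]; exact le_of_lt h)]; exact hm
      exact ih k m (by omega) hm' (by omega) (fun _ => ⟨le_refl _, hq⟩)
        (fun i h1 h2 => absurd (lt_of_le_of_lt h1 h2) (lt_irrefl k))
    · rw [show gbwd xs (s, m) k = (s, xs.getD k 0) from by simp only [gbwd]; rw [if_neg h]]
      have hnq : ¬ Qlo xs k := by
        show ¬ smin xs (xs.length - 2 - k) < xs.getD k 0
        rw [← hmk, ← hm]; exact h
      have hm' : xs.getD k 0 = smin xs (xs.length - 1 - k) := by
        rw [hsmin, min_eq_left (by rw [← hm]; exact not_lt.mp h)]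
      refine ih s (xs.getD k 0) (by omega) hm' hs
        (fun h' => ⟨Nat.le_of_succ_le (hsq h').1, (hsq h').2⟩) ?_
      intro i h1 h2
      rcases Nat.eq_or_lt_of_le h1 with h' | h'
      · exact h' ▸ hnq
      · exact hmin i (by omega) h2

-- the two "least bad index" characterisations coincide
theorem Qlo_Plo (xs : List Int) {i : Nat} (h : Qlo xs i) : Plo xs i :=
  lt_of_lt_of_le h (le_pmax xs (le_refl i))

theorem Plo_exists (xs : List Int) {j : Nat} (h : Plo xs j) : ∃ i, i ≤ j ∧ Qlo xs i := by
  obtain ⟨i, hij, hle⟩ := pmax_attained xs j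
  refine ⟨i, hij, lt_of_le_of_lt (smin_mono xs (by omega)) (lt_of_lt_of_le h hle)⟩

theorem lo_eq (xs : List Int) {n rA rB : Nat} (_hn : n = xs.length)
    (hA1 : rA ≤ n-1) (hA2 : ∀ j, j < rA → ¬ Plo xs j) (hA3 : rA < n-1 → Plo xs rA)
    (hB1 : rB ≤ n-1) (hB2 : ∀ i, i < rB → ¬ Qlo xs i) (hB3 : rB < n-1 → Qlo xs rB) :
    rA = rB := by
  rcases lt_trichotomy rA rB with h | h | h
  · obtain ⟨i, hij, hq⟩ := Plo_exists xs (hA3 (by omega))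
    exact absurd hq (hB2 i (by omega))
  · exact h
  · exact absurd (Qlo_Plo xs (hB3 (by omega))) (hA2 rB h)

theorem Qhi_Phi (xs : List Int) {n i : Nat} (hn : n = xs.length) (h1 : 1 ≤ i) (h2 : i ≤ n-1)
    (h : Qhi xs i) : Phi xs i := by
  refine lt_of_le_of_lt (smin_le xs (by omega) (by omega)) h

theorem Phi_exists (xs : List Int) {n j : Nat} (hn : n = xs.length) (h1 : 1 ≤ j) (h2 : j ≤ n-1)
    (h : Phi xs j) : ∃ i, j ≤ i ∧ i ≤ n-1 ∧ Qhi xs i := by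
  obtain ⟨i, hi1, hi2, hle⟩ := smin_attained xs (xs.length - 1 - j)
  have hji : j ≤ i := by omega
  refine ⟨i, hji, by omega, ?_⟩
  exact lt_of_le_of_lt hle (lt_of_lt_of_le h (pmax_mono xs (by omega)))

theorem hi_eq (xs : List Int) {n rA rB : Nat} (hn : n = xs.length)
    (hA1 : rA ≤ n-1) (hA2 : ∀ j, rA < j → j ≤ n-1 → ¬ Phi xs j) (hA3 : 0 < rA → Phi xs rA)
    (hB1 : rB ≤ n-1) (hB2 : ∀ i, rB < i → i ≤ n-1 → ¬ Qhi xs i) (hB3 : 1 ≤ rB → Qhi xs rB) :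
    rA = rB := by
  rcases lt_trichotomy rA rB with h | h | h
  · exact absurd (Qhi_Phi xs hn (by omega) hB1 (hB3 (by omega))) (hA2 rB h hB1)
  · exact h
  · obtain ⟨i, hi1, hi2, hq⟩ := Phi_exists xs hn (by omega) hA1 (hA3 (by omega))
    exact absurd hq (hB2 i (by omega) hi2)

-- A's loop results, phrased through Plo/Phi
theorem lo_specA (xs : List Int) (hn1 : 1 ≤ xs.length) (r : Nat)
    (hr : r = loLoopA ((List.range xs.length).map (pmax xs))
      (((List.range xs.length).map (smin xs)).reverse) (xs.length-1) 0) :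
    r ≤ xs.length-1 ∧ (∀ j, j < r → ¬ Plo xs j) ∧ (r < xs.length-1 → Plo xs r) := by
  obtain ⟨h1, h2, h3, h4⟩ := loLoopA_spec ((List.range xs.length).map (pmax xs))
    (((List.range xs.length).map (smin xs)).reverse) (xs.length-1) 0
  rw [← hr] at h1 h2 h3 h4
  have hrm : r ≤ xs.length - 1 := h2 (Nat.zero_le _)
  refine ⟨hrm, ?_, ?_⟩
  · intro j hj
    have hgl := h3 j (Nat.zero_le _) hj
    have hjlt : j < xs.length - 1 := lt_of_lt_of_le hj hrm
    rw [F_getD xs rfl (by omega), Bm_getD xs rfl (by omega),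
      show xs.length - 1 - (j+1) = xs.length - 2 - j from by omega] at hgl
    exact not_lt.mpr hgl
  · intro h
    have hgl := h4 h
    rw [F_getD xs rfl (by omega), Bm_getD xs rfl (by omega),
      show xs.length - 1 - (r+1) = xs.length - 2 - r from by omega] at hgl
    exact not_le.mp hgl

theorem hi_specA (xs : List Int) (hn1 : 1 ≤ xs.length) (r : Nat)
    (hr : r = hiLoopA ((List.range xs.length).map (pmax xs))
      (((List.range xs.length).map (smin xs)).reverse) (xs.length-1)) :
    r ≤ xs.length-1 ∧ (∀ j, r < j → j ≤ xs.length-1 → ¬ Phi xs j) ∧ (0 < r → Phi xs r) := by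
  obtain ⟨h1, h2, h3⟩ := hiLoopA_spec ((List.range xs.length).map (pmax xs))
    (((List.range xs.length).map (smin xs)).reverse) (xs.length-1)
  rw [← hr] at h1 h2 h3
  refine ⟨h1, ?_, ?_⟩
  · intro j hj1 hj2
    have hgl := h2 j hj1 hj2
    rw [F_getD xs rfl (by omega), Bm_getD xs rfl (by omega)] at hgl
    exact not_lt.mpr hgl
  · intro h
    have hgl := h3 h
    rw [F_getD xs rfl (by omega), Bm_getD xs rfl (by omega)] at hgl
    exact not_le.mp hgl

-- ===== VERDICT (by name: the statement is the Claim_ definition above) =====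
theorem answer_spec : Claim_equal_answer := by
  intro xs _ hpre
  have hne : xs ≠ [] := hpre
  have hn1 : 1 ≤ xs.length := List.length_pos_iff.mpr hne
  have hF : (List.range' 1 (xs.length-1)).foldl (gA xs) ([xs.getD 0 0], [xs.getD (xs.length-1) 0])
      = ((List.range xs.length).map (pmax xs), (List.range xs.length).map (smin xs)) := by
    have h := A_fold xs (xs.length - 1)
    rwa [show xs.length - 1 + 1 = xs.length from by omega] at h
  have hA : answer xs
      = (((loLoopA ((List.range xs.length).map (pmax xs))
            (((List.range xs.length).map (smin xs)).reverse) (xs.length-1) 0 : Nat) : Int),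
         ((hiLoopA ((List.range xs.length).map (pmax xs))
            (((List.range xs.length).map (smin xs)).reverse) (xs.length-1) : Nat) : Int)) := by
    show (((loLoopA (((List.range' 1 (xs.length-1)).foldl (gA xs)
              ([xs.getD 0 0], [xs.getD (xs.length-1) 0])).1)
            ((((List.range' 1 (xs.length-1)).foldl (gA xs)
              ([xs.getD 0 0], [xs.getD (xs.length-1) 0])).2).reverse)
            (xs.length-1) 0 : Nat) : Int),
          ((hiLoopA (((List.range' 1 (xs.length-1)).foldl (gA xs)
              ([xs.getD 0 0], [xs.getD (xs.length-1) 0])).1)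
            ((((List.range' 1 (xs.length-1)).foldl (gA xs)
              ([xs.getD 0 0], [xs.getD (xs.length-1) 0])).2).reverse)
            (xs.length-1) : Nat) : Int)) = _
    rw [hF]
  have hB : answer_alt xs
      = ((((((List.range (xs.length-1)).reverse).foldl (gbwd xs)
            (xs.length-1, xs.getD (xs.length-1) 0)).1 : Nat) : Int),
         ((((List.range' 1 (xs.length-1)).foldl (gfwd xs) (0, xs.getD 0 0)).1 : Nat) : Int)) := rfl
  show answer xs = answer_alt xs
  rw [hA, hB]
  obtain ⟨hal1, hal2, hal3⟩ := lo_specA xs hn1 _ rfl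
  obtain ⟨hah1, hah2, hah3⟩ := hi_specA xs hn1 _ rfl
  obtain ⟨hf1, hf2, hf3, hf4⟩ := fwd_fold_spec xs (xs.length-1)
  obtain ⟨hb1, hb2, hb3⟩ := bwd_fold_spec xs (xs.length-1) (xs.length-1) (xs.getD (xs.length-1) 0)
    (le_refl _) (by rw [show xs.length - 1 - (xs.length-1) = 0 from by omega]; rfl)
    (le_refl _) (fun h => absurd h (lt_irrefl _))
    (fun i h1 h2 => absurd (lt_of_le_of_lt h1 h2) (lt_irrefl _))
  have hlo := lo_eq xs (n := xs.length) rfl hal1 hal2 hal3 hb1 hb3 hb2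
  have hhi := hi_eq xs (n := xs.length) rfl hah1 hah2 hah3 hf2 hf4 hf3
  rw [hlo, hhi]
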